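-- pv_equiv track=rewrite | github.com/TheLaughingDuck/todoist_taskmaker | main.py | zip_recycle
-- ===== SOURCE A (Python) =====
-- import itertools
--
-- def zip_recycle(iterable):
--     """Takes an iterable, where each element is an iterable of elements.
--     The iterables are zipped (by zip), but shorter elements are recycled.
--     The longest element in fill_values will be gone through once."""
--
--     # Regulate zip_recycle to stop once the longest element in fill_values has been passed once
--     longest = max([len(x) for x in iterable])
--     count = 0
--
--     # Unpack list of recycled iterables.
--     zipped_elements = zip(*[itertools.cycle(sublist) for sublist in iterable])
--     for element in zipped_elements:
--         yield element
--
--         count += 1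
--         if count >= longest: break
-- ===== SOURCE B (Python) =====
-- def zip_recycle(iterable):
--     """Zip the sublists, recycling shorter ones, for max-length many rounds."""
--     lengths = [len(x) for x in iterable]
--     longest = max(lengths)
--     if 0 in lengths:
--         return
--     for i in range(longest):
--         yield tuple(sub[i % len(sub)] for sub in iterable)
-- ===== Notes on version B (the rewrite author's own statement) =====
-- stated objective: idiomatic
-- what changed: Replaces itertools.cycle + zip + a manual break counter with direct modular indexing sub[i % len(sub)] over range(max length); an empty sublist short-circuits to no output, which is exactly zip-of-cycles behaviour.
import Mathlib
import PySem

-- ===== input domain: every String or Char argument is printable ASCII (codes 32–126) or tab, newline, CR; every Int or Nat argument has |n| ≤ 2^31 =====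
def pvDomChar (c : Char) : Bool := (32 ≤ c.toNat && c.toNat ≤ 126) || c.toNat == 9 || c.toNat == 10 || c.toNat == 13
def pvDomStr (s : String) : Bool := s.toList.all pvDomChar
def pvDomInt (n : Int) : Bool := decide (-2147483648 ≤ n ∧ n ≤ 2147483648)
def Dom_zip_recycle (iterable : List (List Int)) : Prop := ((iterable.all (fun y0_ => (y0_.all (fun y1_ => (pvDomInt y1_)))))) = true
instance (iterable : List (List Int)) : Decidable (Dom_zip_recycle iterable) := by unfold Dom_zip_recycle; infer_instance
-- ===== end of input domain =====

-- B replaces itertools.cycle + zip + a manual break counter by direct modular indexing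
-- over range(max length); equivalence of the RETURN value (the generators, fully consumed) is proved.

-- ===== PORT A =====
-- itertools.cycle sublist, as a state (original, remaining): pull the next element,
-- restarting from the original when the remainder is exhausted; none = cycle empty.
def pullCycle (p : List Int × List Int) : Option (Int × (List Int × List Int)) :=
  match p.2 with
  | a :: t => some (a, (p.1, t))
  | [] =>
    match p.1 with
    | a :: t => some (a, (p.1, t))
    | [] => none

-- one step of zip(*cycles): pull from every cycle, or stop (none) if any is exhausted
def stepZip : List (List Int × List Int) → Option (List Int × List (List Int × List Int))
  | [] => some ([], [])
  | p :: ps =>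
    match pullCycle p with
    | none => none
    | some (a, p') =>
      match stepZip ps with
      | none => none
      | some (vs, ps') => some (a :: vs, p' :: ps')

-- A's for-loop: yield, count, break once count ≥ longest — i.e. at most `longest` rounds.
-- (When longest ≤ 0 every sublist is empty, so zip yields nothing and the post-yield
-- break of the Python loop never runs; taking longest.toNat rounds is the same computation.)
def loopA : Nat → List (List Int × List Int) → List (List Int) → List (List Int)
  | 0, _, acc => acc.reverse
  | fuel+1, st, acc =>
    match stepZip st with
    | none => acc.reverse
    | some (vs, st') => loopA fuel st' (vs :: acc)

def zip_recycle (iterable : List (List Int)) : List (List Int) :=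
  match PySem.List.max? (iterable.map (fun x => (x.length : Int))) (fun y => y) with
  | none => []  -- unreachable under Pre_: Python's max([]) raises ValueError
  | some longest => loopA longest.toNat (iterable.map (fun s => (s, s))) []

-- ===== PORT B =====
def zip_recycle_alt (iterable : List (List Int)) : List (List Int) :=
  let lengths : List Int := iterable.map (fun x => (x.length : Int))
  match PySem.List.max? lengths (fun y => y) with
  | none => []  -- unreachable under Pre_: Python's max([]) raises ValueError
  | some longest =>
    if lengths.contains 0 then []
    else
      (PySem.List.pyRange 0 longest 1).map (fun i =>
        iterable.map (fun sub => PySem.List.pyGetD sub (PySem.Int.mod i (sub.length : Int)) 0))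

-- ===== PRECONDITION & SPEC =====
-- Pre_ excludes only the empty outer list, on which both Pythons raise ValueError (max of []).
def Pre_zip_recycle (iterable : List (List Int)) : Prop := iterable ≠ []
instance (iterable : List (List Int)) : Decidable (Pre_zip_recycle iterable) := by unfold Pre_zip_recycle; infer_instance
def pvWitness_zip_recycle : List (List Int) := [[1], [2, 3]]

def Spec_zip_recycle (iterable : List (List Int)) (out : List (List Int)) : Prop := out = zip_recycle_alt iterable
instance (iterable : List (List Int)) (out : List (List Int)) : Decidable (Spec_zip_recycle iterable out) := by unfold Spec_zip_recycle; infer_instance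

-- ===== CLAIM (what is proved, stated in full; the proofs are below) =====
def Claim_equal_zip_recycle : Prop := ∀ (iterable : List (List Int)), Dom_zip_recycle iterable → Pre_zip_recycle iterable → Spec_zip_recycle iterable (zip_recycle iterable)

-- ===== LEMMAS AND PROOFS =====

-- number of already-consumed elements of the current round of a cycle, after k pulls
def posAfter (k n : Nat) : Nat := if k = 0 then 0 else (k - 1) % n + 1

theorem pull_spec (s : List Int) (hs : s ≠ []) (k : Nat) :
    pullCycle (s, s.drop (posAfter k s.length)) =
      some (s.getD (k % s.length) 0, (s, s.drop (posAfter (k + 1) s.length))) := by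
  obtain ⟨a, t, rfl⟩ : ∃ a t, s = a :: t := by
    cases s with
    | nil => exact absurd rfl hs
    | cons a t => exact ⟨a, t, rfl⟩
  simp only [List.length_cons]
  rcases k with _ | k'
  · simp [posAfter, pullCycle]
  · have hm : k' % (t.length + 1) ≤ t.length := by
      have := Nat.mod_lt k' (y := t.length + 1) (by omega); omega
    have hj : posAfter (k' + 1) (t.length + 1) = k' % (t.length + 1) + 1 := by
      simp [posAfter]
    by_cases hlt : k' % (t.length + 1) < t.length
    · have hmod : (k' + 1) % (t.length + 1) = k' % (t.length + 1) + 1 := by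
        rw [← Nat.mod_add_mod]
        exact Nat.mod_eq_of_lt (by omega)
      have hdrop : t.drop (k' % (t.length + 1)) =
          t[k' % (t.length + 1)] :: t.drop (k' % (t.length + 1) + 1) :=
        (List.getElem_cons_drop (h := hlt)).symm
      have hj2 : posAfter (k' + 1 + 1) (t.length + 1) = k' % (t.length + 1) + 2 := by
        simp [posAfter, hmod]
      rw [hj, hj2]
      simp only [List.drop_succ_cons, hdrop, hmod]
      simp [pullCycle, List.getElem?_eq_getElem hlt]
    · have heq : k' % (t.length + 1) = t.length := by omega
      have hmod : (k' + 1) % (t.length + 1) = 0 := by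
        rw [← Nat.mod_add_mod, heq, Nat.mod_self]
      have hj2 : posAfter (k' + 1 + 1) (t.length + 1) = 1 := by
        simp [posAfter, hmod]
      rw [hj, hj2]
      simp [heq, pullCycle, hmod]

theorem step_spec (l : List (List Int)) (h : ∀ s ∈ l, s ≠ []) (k : Nat) :
    stepZip (l.map (fun s => (s, s.drop (posAfter k s.length)))) =
      some (l.map (fun s => s.getD (k % s.length) 0),
            l.map (fun s => (s, s.drop (posAfter (k + 1) s.length)))) := by
  induction l with
  | nil => simp [stepZip]
  | cons s l ih =>
    have hs : s ≠ [] := h s (by simp)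
    have ih' := ih (fun t ht => h t (by simp [ht]))
    simp only [List.map_cons, stepZip, pull_spec s hs k, ih']

theorem loop_spec (l : List (List Int)) (h : ∀ s ∈ l, s ≠ []) (fuel : Nat) :
    ∀ (k : Nat) (acc : List (List Int)),
      loopA fuel (l.map (fun s => (s, s.drop (posAfter k s.length)))) acc =
        acc.reverse ++ (List.range fuel).map
          (fun j => l.map (fun s => s.getD ((k + j) % s.length) 0)) := by
  induction fuel with
  | zero => intro k acc; simp [loopA]
  | succ fuel ih =>
    intro k acc
    rw [loopA, step_spec l h k]
    dsimp only
    rw [ih (k + 1), List.range_succ_eq_map]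
    simp only [List.map_cons, List.map_map, List.reverse_cons, List.append_assoc,
      List.cons_append, List.nil_append, Nat.add_zero]
    congr 1
    congr 1
    apply List.map_congr_left
    intro j _
    simp only [Function.comp_apply]
    apply List.map_congr_left
    intro s _
    congr 2
    omega

theorem stepZip_none (l : List (List Int)) (hs : [] ∈ l) :
    stepZip (l.map (fun t => (t, t))) = none := by
  induction l with
  | nil => simp at hs
  | cons s l ih =>
    rcases List.mem_cons.mp hs with h | h
    · simp [stepZip, pullCycle, ← h]
    · simp only [List.map_cons, stepZip]
      cases hp : pullCycle (s, s) with
      | none => rfl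
      | some v => rw [ih h]

theorem loopA_of_none (fuel : Nat) (st : List (List Int × List Int))
    (h : stepZip st = none) : loopA fuel st [] = [] := by
  cases fuel <;> simp [loopA, h]

-- ===== VERDICT (by name: the statement is the Claim_ definition above) =====
theorem zip_recycle_spec : Claim_equal_zip_recycle := by
  intro iterable _ hpre
  unfold Spec_zip_recycle
  cases hmax : PySem.List.max? (iterable.map (fun x => (x.length : Int))) (fun y => y) with
  | none => simp only [zip_recycle, zip_recycle_alt, hmax]
  | some L =>
    simp only [zip_recycle, zip_recycle_alt, hmax]
    by_cases h0 : (iterable.map (fun x => (x.length : Int))).contains 0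
    · -- some sublist is empty: zip of cycles yields nothing; B returns [] by its guard
      have hmem : [] ∈ iterable := by
        rw [List.contains_iff_mem, List.mem_map] at h0
        obtain ⟨s, hsmem, hslen⟩ := h0
        cases s with
        | nil => exact hsmem
        | cons a t => exfalso; simp at hslen; omega
      rw [if_pos h0, loopA_of_none _ _ (stepZip_none iterable hmem)]
    · -- no empty sublist: both sides are modular indexing over range(longest)
      have hne : ∀ s ∈ iterable, s ≠ [] := by
        intro s hsmem hnil
        subst hnil
        exact h0 (by rw [List.contains_iff_mem, List.mem_map]; exact ⟨[], hsmem, rfl⟩)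
      rw [if_neg h0]
      have hst : iterable.map (fun s => (s, s)) =
          iterable.map (fun s => (s, s.drop (posAfter 0 s.length))) := by
        simp [posAfter]
      rw [hst, loop_spec iterable hne L.toNat 0 []]
      rw [PySem.List.pyRange_one]
      simp only [List.map_map, List.reverse_nil, List.nil_append, Int.sub_zero,
        Nat.zero_add, Int.zero_add]
      apply List.map_congr_left
      intro j _
      apply List.map_congr_left
      intro s hsmem
      rw [PySem.Int.mod_natCast, PySem.List.pyGetD_natCast]
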